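-- pv_equiv track=rewrite | github.com/bpype/blender-studio-pipeline | scripts-blender/addons/pose_shape_keys/naming.py | strip_trailing_numbers
-- ===== SOURCE A (Python) =====
-- def strip_trailing_numbers(name: str) -> tuple[str, str]:
--     if "." in name:
--         # Check if there are only digits after the last period
--         slices = name.split(".")
--         after_last_period = slices[-1]
--         before_last_period = ".".join(slices[:-1])
--
--         # If there are only digits after the last period, discard them
--         if all([c in "0123456789" for c in after_last_period]):
--             return before_last_period, "." + after_last_period
--
--     return name, ""
-- ===== SOURCE B (Python) =====
-- def strip_trailing_numbers(name: str) -> tuple[str, str]: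
--     # Single backward scan: skip trailing digits, then check for a period just before them.
--     i = len(name)
--     while i > 0 and name[i-1] in "0123456789":
--         i -= 1
--     if i > 0 and name[i-1] == ".":
--         return name[:i-1], name[i-1:]
--     return name, ""
-- ===== Notes on version B (the rewrite author's own statement) =====
-- stated objective: alternative
-- what changed: Replaces A's split-on-period/join/all-digit list scan with a single backward index scan that skips trailing digits and checks the character just before them, building no intermediate lists.
import Mathlib
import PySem

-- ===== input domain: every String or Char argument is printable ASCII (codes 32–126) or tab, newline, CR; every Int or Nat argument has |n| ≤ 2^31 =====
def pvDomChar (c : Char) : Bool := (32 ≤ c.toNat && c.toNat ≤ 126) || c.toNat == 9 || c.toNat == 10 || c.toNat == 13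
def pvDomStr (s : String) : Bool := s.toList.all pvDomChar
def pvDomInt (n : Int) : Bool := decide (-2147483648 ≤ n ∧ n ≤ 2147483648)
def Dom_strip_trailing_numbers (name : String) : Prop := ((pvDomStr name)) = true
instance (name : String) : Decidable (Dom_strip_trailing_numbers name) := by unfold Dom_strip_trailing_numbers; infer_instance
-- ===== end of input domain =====

-- B replaces A's split/join/all-digit scan by a single backward index scan (alternative
-- decomposition, same O(n) cost); both are total and agree on every string.

-- `c in "0123456789"` (the same literal test both Pythons perform)
def pvIsDigit (c : Char) : Bool := PySem.Chars.isIn [c] "0123456789".toList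

-- ===== PORT A =====
-- ported on code points (name.toList); PySem.Chars.* are the exact Python string ops
def strip_trailing_numbers (name : String) : String × String :=
  let s := name.toList
  if PySem.Chars.isIn ['.'] s then
    let slices := PySem.Chars.splitOn s ['.']
    -- slices[-1]: split always returns a nonempty list, so pyGet? is some; getD [] only unwraps
    let after_last_period := (PySem.List.pyGet? slices (-1)).getD []
    let before_last_period := PySem.Chars.join ['.'] (PySem.List.slice slices none (some (-1)))
    if after_last_period.all pvIsDigit then
      (String.ofList before_last_period, String.ofList ('.' :: after_last_period))
    else (name, "")
  else (name, "")

-- ===== PORT B =====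
-- the `while i > 0 and name[i-1] in "0123456789": i -= 1` loop of Source B
def pvStripLoop (s : List Char) (i : Nat) : Nat :=
  if h : 0 < i ∧ pvIsDigit ((s[i-1]?).getD ' ') then pvStripLoop s (i-1) else i
termination_by i
decreasing_by omega

def strip_trailing_numbers_alt (name : String) : String × String :=
  let s := name.toList
  let i := pvStripLoop s s.length
  -- name[:i-1] / name[i-1:] with 0 ≤ i-1: exact as take/drop
  if 0 < i ∧ (s[i-1]?).getD ' ' = '.' then
    (String.ofList (s.take (i-1)), String.ofList (s.drop (i-1)))
  else (name, "")

-- ===== PRECONDITION & SPEC =====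
def Spec_strip_trailing_numbers (name : String) (out : String × String) : Prop := out = strip_trailing_numbers_alt name
instance (name : String) (out : String × String) : Decidable (Spec_strip_trailing_numbers name out) := by unfold Spec_strip_trailing_numbers; infer_instance

-- ===== CLAIM (what is proved, stated in full; the proofs are below) =====
def Claim_equal_strip_trailing_numbers : Prop := ∀ (name : String), Dom_strip_trailing_numbers name → Spec_strip_trailing_numbers name (strip_trailing_numbers name)

-- ===== LEMMAS AND PROOFS =====

-- reference single-char splitter
def split1 (c : Char) : List Char → List (List Char)
  | [] => [[]]
  | x :: xs => if x = c then [] :: split1 c xs else (split1 c xs).modifyHead (x :: ·)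

theorem split1_ne_nil (c : Char) (l : List Char) : split1 c l ≠ [] := by
  induction l with
  | nil => simp [split1]
  | cons x xs ih =>
    by_cases h : x = c
    · simp [split1, h]
    · simp only [split1, if_neg h]
      cases hsp : split1 c xs with
      | nil => exact absurd hsp ih
      | cons a t => simp

theorem splitOn_go_eq (c : Char) (fuel : Nat) (l cur : List Char) (acc : List (List Char))
    (h : l.length ≤ fuel) :
    PySem.Chars.splitOn.go [c] fuel l cur acc
      = acc.reverse ++ (split1 c l).modifyHead (cur.reverse ++ ·) := by
  induction fuel generalizing l cur acc with
  | zero =>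
    have : l = [] := List.eq_nil_of_length_eq_zero (Nat.le_zero.mp h)
    subst this
    simp [PySem.Chars.splitOn.go, split1]
  | succ n ih =>
    cases l with
    | nil => simp [PySem.Chars.splitOn.go, split1]
    | cons x rest =>
      rw [PySem.Chars.splitOn.go]
      by_cases hx : x = c
      · have hpre : [c].isPrefixOf (x :: rest) = true := by simp [hx, List.isPrefixOf]
        rw [if_pos hpre]
        simp only [List.length_cons, List.length_nil, List.drop_succ_cons, List.drop_zero]
        rw [ih rest [] (cur.reverse :: acc) (by simpa using Nat.le_of_succ_le_succ (by simpa using h))]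
        simp [split1, hx]
        cases split1 c rest <;> simp
      · have hpre : [c].isPrefixOf (x :: rest) = false := by
          simp [List.isPrefixOf]
          exact fun e => hx e.symm
        rw [if_neg (by simp [hpre])]
        rw [ih rest (x :: cur) acc (by simpa using Nat.le_of_succ_le_succ (by simpa using h))]
        simp only [split1, if_neg hx, List.modifyHead_modifyHead]
        congr 2
        funext a
        simp

theorem splitOn_eq_split1 (c : Char) (s : List Char) :
    PySem.Chars.splitOn s [c] = split1 c s := by
  rw [PySem.Chars.splitOn, splitOn_go_eq c (s.length + 1) s [] [] (by omega)]
  cases hsp : split1 c s with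
  | nil => exact absurd hsp (split1_ne_nil c s)
  | cons a t => simp

theorem split1_no_c (c : Char) (v : List Char) (h : c ∉ v) : split1 c v = [v] := by
  induction v with
  | nil => rfl
  | cons x xs ih =>
    simp only [List.mem_cons, not_or] at h
    have hx : ¬ x = c := fun e => h.1 e.symm
    simp [split1, hx, ih h.2]

theorem split1_append (c : Char) (u v : List Char) (h : c ∉ v) :
    split1 c (u ++ c :: v) = split1 c u ++ [v] := by
  induction u with
  | nil => simp [split1, split1_no_c c v h]
  | cons x xs ih =>
    by_cases hx : x = c
    · simp [split1, hx, ih]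
    · simp only [List.cons_append, split1, if_neg hx, ih]
      cases hsp : split1 c xs with
      | nil => exact absurd hsp (split1_ne_nil c xs)
      | cons a t => simp

theorem join_split1 (c : Char) (u : List Char) :
    PySem.Chars.join [c] (split1 c u) = u := by
  induction u with
  | nil => simp [split1, PySem.Chars.join_singleton]
  | cons x xs ih =>
    cases hsp : split1 c xs with
    | nil => exact absurd hsp (split1_ne_nil c xs)
    | cons a t =>
      rw [hsp] at ih
      by_cases hx : x = c
      · subst hx
        simp [split1, hsp, PySem.Chars.join_cons_cons, ih]
      · simp only [split1, if_neg hx, hsp, List.modifyHead]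
        cases t with
        | nil => simp_all [PySem.Chars.join_singleton]
        | cons b r =>
          rw [PySem.Chars.join_cons_cons] at ih ⊢
          simp [← ih]

-- every list splits at its last occurrence of c (or has none)
theorem last_occ (c : Char) (s : List Char) :
    c ∉ s ∨ ∃ u v, s = u ++ c :: v ∧ c ∉ v := by
  induction s with
  | nil => exact Or.inl (by simp)
  | cons x xs ih =>
    rcases ih with h | ⟨u, v, rfl, hv⟩
    · by_cases hx : x = c
      · exact Or.inr ⟨[], xs, by simp [hx], h⟩
      · refine Or.inl ?_
        intro hm
        rcases List.mem_cons.mp hm with e | hm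
        · exact hx e.symm
        · exact h hm
    · exact Or.inr ⟨x :: u, v, by simp, hv⟩

-- every list ends in a (possibly empty) maximal digit suffix
theorem digit_suffix (v : List Char) :
    (∀ c ∈ v, pvIsDigit c = true) ∨
    ∃ q d w, v = q ++ d :: w ∧ pvIsDigit d = false ∧ (∀ c ∈ w, pvIsDigit c = true) := by
  induction v with
  | nil => exact Or.inl (by simp)
  | cons x xs ih =>
    rcases ih with hall | ⟨q, d, w, rfl, hd, hw⟩
    · by_cases hx : pvIsDigit x = true
      · exact Or.inl (by simpa [hx] using hall)
      · exact Or.inr ⟨[], x, xs, by simp, by simpa using hx, hall⟩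
    · exact Or.inr ⟨x :: q, d, w, by simp, hd, hw⟩

theorem pvStripLoop_le (s : List Char) (i : Nat) : pvStripLoop s i ≤ i := by
  induction i using Nat.strong_induction_on with
  | _ i ih =>
    rw [pvStripLoop]
    split
    · next h => exact le_trans (ih (i-1) (by omega)) (by omega)
    · exact le_refl i

theorem pvStripLoop_eq (s : List Char) (i : Nat)
    (hstop : i = 0 ∨ pvIsDigit ((s[i-1]?).getD ' ') = false) :
    ∀ m, i ≤ m → (∀ j, i ≤ j → j < m → pvIsDigit ((s[j]?).getD ' ') = true) →
    pvStripLoop s m = i := by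
  intro m hm
  induction m, hm using Nat.le_induction with
  | base =>
    intro _
    rw [pvStripLoop]
    rcases hstop with rfl | hs
    · simp
    · rw [dif_neg (by simp [hs])]
  | succ n hn ih =>
    intro hdig
    have hd : pvIsDigit ((s[n + 1 - 1]?).getD ' ') = true := by
      simpa using hdig n hn (by omega)
    rw [pvStripLoop, dif_pos ⟨by omega, hd⟩]
    simpa using ih (fun j hj1 hj2 => hdig j hj1 (by omega))

theorem singleton_infix_iff (c : Char) (s : List Char) : [c] <:+: s ↔ c ∈ s := by
  constructor
  · intro h; exact h.mem (by simp)
  · intro h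
    rcases List.append_of_mem h with ⟨u, v, rfl⟩
    exact ⟨u, v, by simp⟩

-- ===== VERDICT (by name: the statement is the Claim_ definition above) =====
-- B's branch condition, evaluated at the decomposition s = u ++ '.' :: v with '.' ∉ v
theorem alt_case_digits (u v : List Char) (hall : ∀ d ∈ v, pvIsDigit d = true) :
    pvStripLoop (u ++ '.' :: v) (u ++ '.' :: v).length = u.length + 1 := by
  apply pvStripLoop_eq
  · refine Or.inr ?_
    simp only [Nat.add_sub_cancel]
    rw [List.getElem?_append_right (le_refl _)]
    simp only [Nat.sub_self, List.getElem?_cons_zero, Option.getD_some]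
    decide
  · simp
  · intro j hj1 hj2
    simp only [List.length_append, List.length_cons] at hj2
    have h1 : u.length ≤ j := by omega
    rw [List.getElem?_append_right h1]
    have h2 : j - u.length = (j - u.length - 1) + 1 := by omega
    rw [h2]
    simp only [List.getElem?_cons_succ]
    have h3 : j - u.length - 1 < v.length := by omega
    rw [List.getElem?_eq_getElem h3]
    exact hall _ (List.getElem_mem h3)

theorem strip_trailing_numbers_spec : Claim_equal_strip_trailing_numbers := by
  unfold Claim_equal_strip_trailing_numbers
  intro name _
  unfold Spec_strip_trailing_numbers strip_trailing_numbers strip_trailing_numbers_alt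
  simp only []
  rcases last_occ '.' name.toList with hnod | ⟨u, v, hs, hv⟩
  · -- no '.' in the name: both sides fall through to (name, "")
    have hisin : PySem.Chars.isIn ['.'] name.toList = false := by
      cases hb : PySem.Chars.isIn ['.'] name.toList with
      | false => rfl
      | true =>
        exact absurd ((singleton_infix_iff _ _).mp ((PySem.Chars.isIn_iff_infix _ _).mp hb)) hnod
    rw [if_neg (by simp [hisin])]
    rw [if_neg ?_]
    rintro ⟨hpos, hdot⟩
    have hle := pvStripLoop_le name.toList name.toList.length
    have hlt : pvStripLoop name.toList name.toList.length - 1 < name.toList.length := by omega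
    rw [List.getElem?_eq_getElem hlt] at hdot
    exact hnod (hdot ▸ List.getElem_mem hlt)
  · -- name = u ++ "." ++ v with no '.' in v
    have hisin : PySem.Chars.isIn ['.'] name.toList = true := by
      rw [PySem.Chars.isIn_iff_infix, singleton_infix_iff, hs]; simp
    rw [if_pos hisin, hs]
    rw [splitOn_eq_split1, split1_append '.' u v hv]
    rw [PySem.List.pyGet?_neg_one_append_singleton]
    rw [PySem.List.slice_to_neg_one, List.dropLast_concat, join_split1]
    rcases digit_suffix v with hall | ⟨q, d, w, rfl, hd, hw⟩
    · -- the whole tail v is digits: both strip it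
      rw [if_pos (by simpa using List.all_eq_true.mpr hall)]
      rw [alt_case_digits u v hall]
      rw [if_pos ⟨by omega, by simp⟩]
      simp
    · -- a non-digit sits just before the digit suffix: both leave the name alone
      have hvd : (q ++ d :: w).all pvIsDigit = false := by simp [hd]
      rw [if_neg (by simp [hvd])]
      have hidx : (u ++ '.' :: (q ++ d :: w))[u.length + 1 + q.length]? = some d := by
        rw [List.getElem?_append_right (by omega)]
        have h2 : u.length + 1 + q.length - u.length = q.length + 1 := by omega
        rw [h2, List.getElem?_cons_succ, List.getElem?_append_right (le_refl _)]
        simp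
      have hloop : pvStripLoop (u ++ '.' :: (q ++ d :: w)) (u ++ '.' :: (q ++ d :: w)).length
          = u.length + 1 + q.length + 1 := by
        apply pvStripLoop_eq
        · refine Or.inr ?_
          simp only [Nat.add_sub_cancel]
          rw [hidx]
          simpa using hd
        · simp; omega
        · intro j hj1 hj2
          simp only [List.length_append, List.length_cons] at hj2
          rw [List.getElem?_append_right (by omega)]
          have h2 : j - u.length = (j - u.length - 1) + 1 := by omega
          rw [h2, List.getElem?_cons_succ, List.getElem?_append_right (by omega)]
          have h3 : j - u.length - 1 - q.length = (j - u.length - 1 - q.length - 1) + 1 := by omega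
          rw [h3, List.getElem?_cons_succ]
          have h4 : j - u.length - 1 - q.length - 1 < w.length := by omega
          rw [List.getElem?_eq_getElem h4]
          exact hw _ (List.getElem_mem h4)
      rw [hloop, if_neg ?_]
      rintro ⟨-, hdot⟩
      rw [show u.length + 1 + q.length + 1 - 1 = u.length + 1 + q.length from by omega, hidx] at hdot
      simp only [Option.getD_some] at hdot
      subst hdot
      exact hv (by simp)
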